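-- pv_equiv track=rewrite | github.com/swarnimcodes/employee-performance | src/performance.py | remove_url_prefix
-- ===== SOURCE A (Python) =====
-- def remove_url_prefix(url: str) -> str:
--     try:
--         resultant_url: str = url
--         if url == "":
--             return url
--         prefixes = ("http://", "https://")
--         for prefix in prefixes:
--             if url == prefix or url.startswith(prefix):
--                 resultant_url = url[len(prefix) :]
--                 break
--         if url.startswith("www."):
--             resultant_url = url[len("www.") :]
--         return resultant_url
--     except Exception as err:
--         error(f"`remove_url_prefix` function failed: {err}")
--         return url
-- ===== SOURCE B (Python) =====
-- import re
--
-- _URL_PREFIX_RE = re.compile(r'^(https?://|www\.)')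
--
-- def remove_url_prefix(url: str) -> str:
--     return _URL_PREFIX_RE.sub('', url, count=1)
-- ===== Notes on version B (the rewrite author's own statement) =====
-- stated objective: idiomatic
-- what changed: Replaced the manual prefix loop with break flag plus separate www check by a single anchored regex substitution that deletes the leading http://, https:// or www. prefix; the dead try/except around pure string operations is dropped.
import Mathlib
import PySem

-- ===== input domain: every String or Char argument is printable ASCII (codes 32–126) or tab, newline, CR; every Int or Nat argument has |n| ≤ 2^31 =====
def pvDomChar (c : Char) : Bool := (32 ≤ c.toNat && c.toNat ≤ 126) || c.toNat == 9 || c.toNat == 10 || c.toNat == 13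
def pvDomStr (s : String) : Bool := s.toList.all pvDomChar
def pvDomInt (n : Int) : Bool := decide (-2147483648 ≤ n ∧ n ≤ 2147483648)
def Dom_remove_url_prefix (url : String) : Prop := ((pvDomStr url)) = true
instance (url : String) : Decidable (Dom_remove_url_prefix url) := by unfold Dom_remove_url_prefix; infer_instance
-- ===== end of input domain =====

-- B replaces A's manual prefix loop + separate www check with one anchored regex substitution (idiomatic; same cost).


-- ===== PORT A =====
-- the 'for prefix in prefixes: … break' loop, carrying resultant_url
def pvStripLoopA : List String → String → String → String
  | [], _, res => res
  | p :: ps, url, res =>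
    if url = p ∨ PySem.Str.startswith url p then
      PySem.Str.slice url (some (PySem.Str.len p)) none
    else pvStripLoopA ps url res

def remove_url_prefix (url : String) : String :=
  if url = "" then url
  else
    let res := pvStripLoopA ["http://", "https://"] url url
    if PySem.Str.startswith url "www." then
      PySem.Str.slice url (some (PySem.Str.len "www.")) none
    else res

-- ===== PORT B =====
-- hand port of the regex engine for Source B's anchored pattern '^(https?://|www\.)'
-- (exact on all strings: literal consumption, greedy 's?' with backtracking, ordered alternation);
-- a successful match returns the suffix after the match, and sub('', url, count=1) keeps exactly that suffix.
def pvMatchLit : List Char → List Char → Option (List Char)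
  | [], cs => some cs
  | _ :: _, [] => none
  | c :: lit, d :: cs => if d = c then pvMatchLit lit cs else none

-- first alternative 'https?://'
def pvRegexAlt1 (cs : List Char) : Option (List Char) :=
  match pvMatchLit ("http".toList) cs with
  | none => none
  | some rest =>
    match rest with
    | [] => pvMatchLit ("://".toList) rest
    | a :: rest' =>
      if a = 's' then
        match pvMatchLit ("://".toList) rest' with
        | some r => some r
        | none => pvMatchLit ("://".toList) rest   -- backtrack over the optional 's'
      else pvMatchLit ("://".toList) rest

-- the alternation: 'https?://' first, else 'www\.'
def pvRegexMatch (cs : List Char) : Option (List Char) :=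
  match pvRegexAlt1 cs with
  | some r => some r
  | none => pvMatchLit ("www.".toList) cs

def remove_url_prefix_alt (url : String) : String :=
  match pvRegexMatch url.toList with
  | some rest => String.ofList rest   -- '' replacement ++ suffix after the single leading match
  | none => url

-- ===== PRECONDITION & SPEC =====
def Spec_remove_url_prefix (url : String) (out : String) : Prop := out = remove_url_prefix_alt url
instance (url : String) (out : String) : Decidable (Spec_remove_url_prefix url out) := by unfold Spec_remove_url_prefix; infer_instance

-- ===== CLAIM (what is proved, stated in full; the proofs are below) =====
def Claim_equal_remove_url_prefix : Prop := ∀ (url : String), Dom_remove_url_prefix url → Spec_remove_url_prefix url (remove_url_prefix url)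

-- ===== LEMMAS AND PROOFS =====

theorem pvMatchLit_eq_some_iff (lit cs r : List Char) :
    pvMatchLit lit cs = some r ↔ cs = lit ++ r := by
  induction lit generalizing cs with
  | nil => simp [pvMatchLit]
  | cons c lit ih =>
    cases cs with
    | nil => simp [pvMatchLit]
    | cons d cs =>
      by_cases h : d = c
      · subst h; simp [pvMatchLit, ih]
      · simp [pvMatchLit, h]

theorem pvMatchLit_not_prefix (lit cs : List Char) (h : ¬ lit <+: cs) :
    pvMatchLit lit cs = none := by
  cases hm : pvMatchLit lit cs with
  | none => rfl
  | some r =>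
    rw [pvMatchLit_eq_some_iff] at hm
    exact absurd ⟨r, hm.symm⟩ h

theorem pv_sw_false (url p : String) (h : ¬ p.toList <+: url.toList) :
    PySem.Str.startswith url p = false := by
  simp only [PySem.Str.startswith]
  rw [Bool.eq_false_iff]
  intro hc
  exact h ((PySem.Chars.startswith_iff _ _).mp hc)

theorem pv_ne_of_not_prefix (url p : String) (h : ¬ p.toList <+: url.toList) :
    url ≠ p := by
  intro he; exact h (by rw [he])

-- ===== VERDICT (by name: the statement is the Claim_ definition above) =====
theorem remove_url_prefix_spec : Claim_equal_remove_url_prefix := by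
  intro url _
  unfold Spec_remove_url_prefix remove_url_prefix remove_url_prefix_alt
  by_cases h0 : url = ""
  · subst h0; rfl
  rw [if_neg h0]
  by_cases h7 : "http://".toList <+: url.toList
  · obtain ⟨t, ht⟩ := h7
    have hl : url.toList = 'h'::'t'::'t'::'p'::':'::'/'::'/'::t := by rw [← ht]; rfl
    simp [pvStripLoopA, pvRegexMatch, pvRegexAlt1, pvMatchLit, hl,
      (show ("http" : String).toList = ['h','t','t','p'] from rfl),
      (show ("://" : String).toList = [':','/','/'] from rfl),
      (show ("www." : String).toList = ['w','w','w','.'] from rfl),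
      PySem.Str.slice, PySem.Str.len, PySem.Chars.slice_eq_listSlice, PySem.Chars.startswith, PySem.List.slice, PySem.List.clampIdx, List.drop_succ_cons, List.drop]
  by_cases h8 : "https://".toList <+: url.toList
  · obtain ⟨t, ht⟩ := h8
    have hl : url.toList = 'h'::'t'::'t'::'p'::'s'::':'::'/'::'/'::t := by rw [← ht]; rfl
    have n7 := pv_ne_of_not_prefix url "http://" (by rw [hl]; simp [List.cons_prefix_cons])
    simp [pvStripLoopA, n7, pvRegexMatch, pvRegexAlt1, pvMatchLit, hl,
      (show ("http" : String).toList = ['h','t','t','p'] from rfl),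
      (show ("://" : String).toList = [':','/','/'] from rfl),
      (show ("www." : String).toList = ['w','w','w','.'] from rfl),
      PySem.Str.slice, PySem.Str.len, PySem.Chars.slice_eq_listSlice, PySem.Chars.startswith, PySem.List.slice, PySem.List.clampIdx, List.drop_succ_cons, List.drop]
  by_cases hw : "www.".toList <+: url.toList
  · obtain ⟨t, ht⟩ := hw
    have hl : url.toList = 'w'::'w'::'w'::'.'::t := by rw [← ht]; rfl
    simp [pvRegexMatch, pvRegexAlt1, pvMatchLit, hl,
      (show ("http" : String).toList = ['h','t','t','p'] from rfl),
      (show ("www." : String).toList = ['w','w','w','.'] from rfl),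
      PySem.Str.slice, PySem.Str.len, PySem.Chars.slice_eq_listSlice, PySem.Chars.startswith, PySem.List.slice, PySem.List.clampIdx, List.drop_succ_cons, List.drop]
  · -- no alternative matches: both return url
    have c7 := pv_sw_false url "http://" h7
    have c8 := pv_sw_false url "https://" h8
    have cw := pv_sw_false url "www." hw
    have n7 := pv_ne_of_not_prefix url "http://" h7
    have n8 := pv_ne_of_not_prefix url "https://" h8
    have halt : pvRegexAlt1 url.toList = none := by
      unfold pvRegexAlt1
      cases hm : pvMatchLit ("http".toList) url.toList with
      | none => rfl
      | some rest =>
        rw [pvMatchLit_eq_some_iff] at hm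
        cases rest with
        | nil => simp [pvMatchLit]
        | cons a rest' =>
          by_cases ha : a = 's'
          · subst ha
            have e1 : pvMatchLit [':','/','/'] rest' = none := by
              apply pvMatchLit_not_prefix
              rintro ⟨r, hr⟩
              exact h8 ⟨r, by rw [hm, ← hr]; rfl⟩
            have e2 : pvMatchLit [':','/','/'] ('s'::rest') = none := by
              apply pvMatchLit_not_prefix
              rintro ⟨r, hr⟩
              simp at hr
            simp [e1, e2]
          · have e2 : pvMatchLit [':','/','/'] (a::rest') = none := by
              apply pvMatchLit_not_prefix
              rintro ⟨r, hr⟩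
              exact h7 ⟨r, by rw [hm, ← hr]; rfl⟩
            simp [ha, e2]
    have hww : pvMatchLit ("www.".toList) url.toList = none := pvMatchLit_not_prefix _ _ hw
    simp only [pvStripLoopA, c7, c8, n7, n8, cw, Bool.false_eq_true, if_false, or_self,
      pvRegexMatch, halt, hww]
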